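-- pv_equiv track=rewrite | github.com/afilipch/afp | project_scripts/global_chap/gene_networks.py | collapse_genes
-- ===== SOURCE A (Python) =====
-- from collections import defaultdict
--
-- def collapse_genes(genesets):
--     gene2scores = defaultdict(list);
--     allgenes = set()
--     for d in genesets:
--         allgenes.update(d.keys());
--     for gene in allgenes:
--         for d in genesets:
--             gene2scores[gene].append(d.get(gene, 0));
--
--     return gene2scores
-- ===== SOURCE B (Python) =====
-- from collections import defaultdict
--
-- def collapse_genes(genesets):
--     gene2scores = defaultdict(list)
--     allgenes = set()
--     for d in genesets:
--         allgenes.update(d.keys())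
--     n = len(genesets)
--     for gene in allgenes:
--         gene2scores[gene] = [0] * n
--     for i, d in enumerate(genesets):
--         for gene, score in d.items():
--             gene2scores[gene][i] = score
--     return gene2scores
-- ===== Notes on version B (the rewrite author's own statement) =====
-- stated objective: faster
-- what changed: Instead of gathering each gene's row by re-querying every geneset dict with d.get (|allgenes| * len(genesets) lookups), B pre-allocates a zero row per gene and makes one scatter pass over the genesets' own items, writing each present score into its fixed position; work drops from touching every (gene, geneset) pair to touching only present entries plus zero-filling.
import Mathlib
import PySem

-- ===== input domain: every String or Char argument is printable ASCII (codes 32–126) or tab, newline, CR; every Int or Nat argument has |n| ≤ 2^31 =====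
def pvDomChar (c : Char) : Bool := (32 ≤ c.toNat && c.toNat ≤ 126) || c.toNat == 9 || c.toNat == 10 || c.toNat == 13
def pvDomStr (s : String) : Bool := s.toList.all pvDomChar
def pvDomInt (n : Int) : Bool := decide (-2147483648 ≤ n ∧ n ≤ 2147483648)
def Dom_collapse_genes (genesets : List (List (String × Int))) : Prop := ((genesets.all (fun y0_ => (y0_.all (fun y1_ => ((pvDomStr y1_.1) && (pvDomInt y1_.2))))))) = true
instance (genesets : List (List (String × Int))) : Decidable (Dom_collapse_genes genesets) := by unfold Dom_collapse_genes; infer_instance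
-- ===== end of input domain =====

-- B replaces A's per-gene gathering pass (one d.get per (gene, geneset) pair) by a
-- zero-initialised row per gene plus a single scatter pass over each geneset's own items
-- (objective: faster). Both Pythons return a defaultdict whose key order follows set hash
-- order; the result is compared as a dict (order-insensitively), and the ports realise it
-- in first-insertion order.

-- ===== PORT A =====
def collapse_genes (genesets : List (List (String × Int))) : List (String × List Int) :=
  -- allgenes = set(); for d in genesets: allgenes.update(d.keys())
  let allgenes : PySem.Set String :=
    genesets.foldl (fun s d => PySem.Set.update s (PySem.Dict.ofList d).keys) PySem.Set.empty
  -- for gene in allgenes: for d in genesets: gene2scores[gene].append(d.get(gene, 0))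
  let gene2scores : PySem.Dict String (List Int) :=
    allgenes.foldl (fun acc gene =>
      genesets.foldl (fun acc d =>
        acc.modify gene [] (fun l => l ++ [(PySem.Dict.ofList d).getD gene 0])) acc)
      PySem.Dict.empty
  gene2scores.items

-- ===== PORT B =====
def collapse_genes_alt (genesets : List (List (String × Int))) : List (String × List Int) :=
  let allgenes : PySem.Set String :=
    genesets.foldl (fun s d => PySem.Set.update s (PySem.Dict.ofList d).keys) PySem.Set.empty
  let n : Nat := genesets.length
  -- for gene in allgenes: gene2scores[gene] = [0] * n
  let init : PySem.Dict String (List Int) :=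
    allgenes.foldl (fun acc gene => acc.insert gene (List.replicate n 0)) PySem.Dict.empty
  -- for i, d in enumerate(genesets): for gene, score in d.items(): gene2scores[gene][i] = score
  -- (i is always a valid non-negative index of gene's pre-allocated row, so List.set at i.toNat is exact)
  let final : PySem.Dict String (List Int) :=
    (PySem.List.enumerate genesets).foldl (fun acc p =>
      (PySem.Dict.ofList p.2).items.foldl (fun acc q =>
        acc.modify q.1 [] (fun l => l.set p.1.toNat q.2)) acc) init
  final.items

-- ===== PRECONDITION & SPEC =====
def Spec_collapse_genes (genesets : List (List (String × Int))) (out : List (String × List Int)) : Prop := out = collapse_genes_alt genesets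
instance (genesets : List (List (String × Int))) (out : List (String × List Int)) : Decidable (Spec_collapse_genes genesets out) := by unfold Spec_collapse_genes; infer_instance

-- ===== CLAIM (what is proved, stated in full; the proofs are below) =====
def Claim_equal_collapse_genes : Prop := ∀ (genesets : List (List (String × Int))), Dom_collapse_genes genesets → Spec_collapse_genes genesets (collapse_genes genesets)

-- ===== LEMMAS AND PROOFS =====

-- the score A's row records for gene g from geneset d: d.get(g, 0)
def pvScore (g : String) (d : List (String × Int)) : Int := (PySem.Dict.ofList d).getD g 0

-- the accumulated allgenes set (the same fold both ports start with)
def pvAll (genesets : List (List (String × Int))) : PySem.Set String :=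
  genesets.foldl (fun s d => PySem.Set.update s (PySem.Dict.ofList d).keys) PySem.Set.empty

theorem pv_foldl_update_nodup (l : List (List (String × Int))) (s : PySem.Set String) (h : s.Nodup) :
    (l.foldl (fun s d => PySem.Set.update s (PySem.Dict.ofList d).keys) s).Nodup := by
  induction l generalizing s with
  | nil => exact h
  | cons a t ih => exact ih _ (PySem.Set.nodup_update _ _ h)

theorem pvAll_nodup (genesets : List (List (String × Int))) : (pvAll genesets).Nodup :=
  pv_foldl_update_nodup _ _ List.nodup_nil

theorem pv_mem_foldl_update (l : List (List (String × Int))) (s : PySem.Set String) (g : String) :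
    g ∈ l.foldl (fun s d => PySem.Set.update s (PySem.Dict.ofList d).keys) s
      ↔ g ∈ s ∨ ∃ d ∈ l, g ∈ (PySem.Dict.ofList d).keys := by
  induction l generalizing s with
  | nil => simp
  | cons a t ih =>
    simp only [List.foldl_cons, ih, PySem.Set.mem_update, List.mem_cons]
    constructor
    · rintro ((h|h)|⟨d,hd,h⟩)
      · exact Or.inl h
      · exact Or.inr ⟨a, Or.inl rfl, h⟩
      · exact Or.inr ⟨d, Or.inr hd, h⟩
    · rintro (h|⟨d,(rfl|hd),h⟩)
      · exact Or.inl (Or.inl h)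
      · exact Or.inl (Or.inr h)
      · exact Or.inr ⟨d, hd, h⟩

theorem mem_pvAll_of {genesets : List (List (String × Int))} {d : List (String × Int)} {g : String}
    (hd : d ∈ genesets) (hg : g ∈ (PySem.Dict.ofList d).keys) : g ∈ pvAll genesets := by
  rw [pvAll, pv_mem_foldl_update]; exact Or.inr ⟨d, hd, hg⟩

-- ---- A side ----

theorem Ainner_getD_self (ds : List (List (String × Int)))
    (acc : PySem.Dict String (List Int)) (g : String) :
    (ds.foldl (fun acc d =>
        acc.modify g [] (fun l => l ++ [(PySem.Dict.ofList d).getD g 0])) acc).getD g []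
      = acc.getD g [] ++ ds.map (pvScore g) := by
  induction ds generalizing acc with
  | nil => simp
  | cons a t ih =>
    simp only [List.foldl_cons, List.map_cons, ih, PySem.Dict.getD_modify_self]
    simp [pvScore]

theorem Ainner_getD_ne (ds : List (List (String × Int)))
    (acc : PySem.Dict String (List Int)) {g g' : String} (h : g' ≠ g) :
    (ds.foldl (fun acc d =>
        acc.modify g [] (fun l => l ++ [(PySem.Dict.ofList d).getD g 0])) acc).getD g' []
      = acc.getD g' [] := by
  induction ds generalizing acc with
  | nil => rfl
  | cons a t ih => simp only [List.foldl_cons, ih, PySem.Dict.getD_modify_of_ne _ _ _ h]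

theorem Ainner_contains_ne (ds : List (List (String × Int)))
    (acc : PySem.Dict String (List Int)) {g g' : String} (h : g' ≠ g) :
    (ds.foldl (fun acc d =>
        acc.modify g [] (fun l => l ++ [(PySem.Dict.ofList d).getD g 0])) acc).contains g'
      = acc.contains g' := by
  induction ds generalizing acc with
  | nil => rfl
  | cons a t ih => simp [ih, PySem.Dict.contains_modify, h]

theorem Ainner_keys_of_mem (ds : List (List (String × Int)))
    (acc : PySem.Dict String (List Int)) (g : String) (h : g ∈ acc.keys) :
    (ds.foldl (fun acc d =>
        acc.modify g [] (fun l => l ++ [(PySem.Dict.ofList d).getD g 0])) acc).keys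
      = acc.keys := by
  induction ds generalizing acc with
  | nil => rfl
  | cons a t ih =>
    rw [List.foldl_cons, ih]
    · rw [PySem.Dict.keys_modify, PySem.Dict.keys_insert_of_contains]
      exact (PySem.Dict.contains_iff_mem_keys _ _).2 h
    · rw [PySem.Dict.keys_modify]
      exact (PySem.Dict.mem_keys_insert acc g g _).2 (Or.inl rfl)

theorem Ainner_keys (ds : List (List (String × Int)))
    (acc : PySem.Dict String (List Int)) (g : String) (h : ds ≠ []) :
    (ds.foldl (fun acc d =>
        acc.modify g [] (fun l => l ++ [(PySem.Dict.ofList d).getD g 0])) acc).keys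
      = PySem.Set.add acc.keys g := by
  cases ds with
  | nil => exact absurd rfl h
  | cons a t =>
    rw [List.foldl_cons, Ainner_keys_of_mem]
    · rw [PySem.Dict.keys_modify]
      by_cases hc : acc.contains g
      · rw [PySem.Dict.keys_insert_of_contains _ _ hc,
          PySem.Set.add_of_mem ((PySem.Dict.contains_iff_mem_keys _ _).1 hc)]
      · rw [PySem.Dict.keys_insert_of_not_contains _ _ (by simpa using hc)]
        rw [PySem.Set.add_of_not_mem]
        intro hm; exact hc ((PySem.Dict.contains_iff_mem_keys _ _).2 hm)
    · rw [PySem.Dict.keys_modify]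
      exact (PySem.Dict.mem_keys_insert acc g g _).2 (Or.inl rfl)

theorem Aouter_keys (genesets : List (List (String × Int))) (h : genesets ≠ [])
    (gs : List String) (D : PySem.Dict String (List Int)) :
    (gs.foldl (fun acc gene =>
        genesets.foldl (fun acc d =>
          acc.modify gene [] (fun l => l ++ [(PySem.Dict.ofList d).getD gene 0])) acc) D).keys
      = PySem.Set.update D.keys gs := by
  induction gs generalizing D with
  | nil => rfl
  | cons a t ih =>
    rw [List.foldl_cons, ih, PySem.Set.update_cons, Ainner_keys _ _ _ h]

theorem Aouter_getD_notmem (genesets : List (List (String × Int)))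
    (gs : List String) (D : PySem.Dict String (List Int)) {g : String} (h : g ∉ gs) :
    (gs.foldl (fun acc gene =>
        genesets.foldl (fun acc d =>
          acc.modify gene [] (fun l => l ++ [(PySem.Dict.ofList d).getD gene 0])) acc) D).getD g []
      = D.getD g [] := by
  induction gs generalizing D with
  | nil => rfl
  | cons a t ih =>
    rw [List.foldl_cons, ih _ (fun hm => h (List.mem_cons_of_mem _ hm)),
      Ainner_getD_ne _ _ (g' := g) (g := a) (fun he => h (by simp [he]))]

theorem Aouter_getD (genesets : List (List (String × Int)))
    (gs : List String) (D : PySem.Dict String (List Int)) {g : String}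
    (hnd : gs.Nodup) (hmem : g ∈ gs) (hc : D.contains g = false) :
    (gs.foldl (fun acc gene =>
        genesets.foldl (fun acc d =>
          acc.modify gene [] (fun l => l ++ [(PySem.Dict.ofList d).getD gene 0])) acc) D).getD g []
      = genesets.map (pvScore g) := by
  induction gs generalizing D with
  | nil => simp at hmem
  | cons a t ih =>
    rw [List.foldl_cons]
    rcases List.mem_cons.1 hmem with rfl | hmt
    · rw [Aouter_getD_notmem _ _ _ (List.nodup_cons.1 hnd).1,
        Ainner_getD_self, PySem.Dict.getD_of_not_contains _ _ hc, List.nil_append]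
    · have hne : g ≠ a := fun he => ((List.nodup_cons.1 hnd).1 (he ▸ hmt)).elim
      exact ih _ (List.nodup_cons.1 hnd).2 hmt
        (by rw [Ainner_contains_ne _ _ hne]; exact hc)

-- ---- B side ----

theorem Binner_getD_notmem (ps : List (String × Int)) (i : Nat)
    (acc : PySem.Dict String (List Int)) {g : String} (h : g ∉ ps.map Prod.fst) :
    (ps.foldl (fun acc q => acc.modify q.1 [] (fun l => l.set i q.2)) acc).getD g []
      = acc.getD g [] := by
  induction ps generalizing acc with
  | nil => rfl
  | cons a t ih =>
    simp only [List.map_cons, List.mem_cons, not_or] at h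
    rw [List.foldl_cons, ih _ h.2, PySem.Dict.getD_modify_of_ne _ _ _ h.1]

theorem Binner_getD_mem (ps : List (String × Int)) (i : Nat)
    (acc : PySem.Dict String (List Int)) {g : String} {v : Int}
    (hmem : (g, v) ∈ ps) (hnd : (ps.map Prod.fst).Nodup) :
    (ps.foldl (fun acc q => acc.modify q.1 [] (fun l => l.set i q.2)) acc).getD g []
      = (acc.getD g []).set i v := by
  induction ps generalizing acc with
  | nil => simp at hmem
  | cons a t ih =>
    simp only [List.map_cons, List.nodup_cons] at hnd
    rcases List.mem_cons.1 hmem with he | hmt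
    · cases he
      rw [List.foldl_cons, Binner_getD_notmem _ _ _ hnd.1,
        PySem.Dict.getD_modify_self acc g [] _]
    · have hne : g ≠ a.1 := fun he => hnd.1 (he ▸ List.mem_map_of_mem hmt)
      rw [List.foldl_cons, ih _ hmt hnd.2, PySem.Dict.getD_modify_of_ne _ _ _ hne]

theorem Bstep_getD (d : List (String × Int)) (i : Nat)
    (acc : PySem.Dict String (List Int)) (g : String) :
    ((PySem.Dict.ofList d).items.foldl
        (fun acc q => acc.modify q.1 [] (fun l => l.set i q.2)) acc).getD g []
      = if (PySem.Dict.ofList d).contains g then (acc.getD g []).set i (pvScore g d)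
        else acc.getD g [] := by
  by_cases hc : (PySem.Dict.ofList d).contains g
  · rw [if_pos hc]
    rcases Option.isSome_iff_exists.1
      (show ((PySem.Dict.ofList d).get? g).isSome = true by
        rw [← PySem.Dict.contains_eq_isSome_get?]; exact hc) with ⟨v, hv⟩
    have hmem := PySem.Dict.mem_items_of_get?_eq_some _ hv
    have hval : pvScore g d = v := by
      rw [pvScore, PySem.Dict.getD_eq_get?_getD, hv]; rfl
    rw [hval]
    exact Binner_getD_mem _ _ _ hmem (PySem.Dict.nodup_keys_ofList d)
  · rw [if_neg hc]
    refine Binner_getD_notmem _ _ _ (fun hm => hc ?_)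
    exact (PySem.Dict.contains_iff_mem_keys _ _).2 hm

theorem pv_take_succ_set (l : List Int) (s : Nat) (v : Int) (h : s < l.length) :
    (l.set s v).take (s+1) = l.take s ++ [v] := by
  induction l generalizing s with
  | nil => simp at h
  | cons a t ih =>
    cases s with
    | zero => simp
    | succ m => simp at h ⊢; rw [ih m (by omega)]

theorem pv_take_succ_getD (l : List Int) (s : Nat) (h : s < l.length) :
    l.take (s+1) = l.take s ++ [l.getD s 0] := by
  rw [List.take_add_one, List.getElem?_eq_getElem h]
  simp [List.getD_eq_getElem?_getD, List.getElem?_eq_getElem h]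

theorem pv_getD_set_ne (l : List Int) (s j : Nat) (v : Int) (h : j ≠ s) :
    (l.set s v).getD j 0 = l.getD j 0 := by
  simp [List.getD_eq_getElem?_getD, List.getElem?_set_ne (Ne.symm h)]

theorem Bscatter_getD (g : String) (ds : List (List (String × Int))) (s : Nat)
    (D : PySem.Dict String (List Int))
    (hlen : (D.getD g []).length = s + ds.length)
    (hz : ∀ j, s ≤ j → (D.getD g []).getD j 0 = 0) :
    ((PySem.List.enumerate ds (s : Int)).foldl (fun acc p =>
        (PySem.Dict.ofList p.2).items.foldl
          (fun acc q => acc.modify q.1 [] (fun l => l.set p.1.toNat q.2)) acc) D).getD g []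
      = (D.getD g []).take s ++ ds.map (pvScore g) := by
  induction ds generalizing s D with
  | nil =>
    simp only [PySem.List.enumerate_nil, List.foldl_nil, List.map_nil, List.append_nil]
    simp only [List.length_nil, Nat.add_zero] at hlen
    rw [List.take_of_length_le (by omega)]
  | cons d t ih =>
    rw [PySem.List.enumerate_cons, List.foldl_cons]
    simp only [List.length_cons] at hlen
    have hslen : s < (D.getD g []).length := by omega
    have hstep := Bstep_getD d ((s : Int)).toNat D g
    have htoNat : ((s : Int)).toNat = s := by simp
    rw [htoNat] at hstep
    have hcast : ((s : Int) + 1) = ((s + 1 : Nat) : Int) := by push_cast; ring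
    rw [hcast]
    set cur := D.getD g [] with hcur
    set D' := (PySem.Dict.ofList d).items.foldl
        (fun acc q => acc.modify q.1 [] (fun l => l.set s q.2)) D with hD'
    have hred : List.foldl (fun acc q => acc.modify q.1 [] fun l => l.set ((s : Int), d).1.toNat q.2) D
        (PySem.Dict.ofList ((s : Int), d).2).items = D' := rfl
    rw [hred]
    by_cases hc : (PySem.Dict.ofList d).contains g
    · have hD'g : D'.getD g [] = cur.set s (pvScore g d) := by rw [hD', hstep, if_pos hc]
      rw [ih (s+1) D'
        (by rw [hD'g]; simp only [List.length_set]; omega)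
        (by intro j hj; rw [hD'g, pv_getD_set_ne _ _ _ _ (by omega)]; exact hz j (by omega))]
      rw [hD'g, pv_take_succ_set _ _ _ hslen]
      simp [pvScore]
    · have hval : pvScore g d = 0 := by
        rw [pvScore, PySem.Dict.getD_of_not_contains _ _ (by simpa using hc)]
      have hD'g : D'.getD g [] = cur := by rw [hD', hstep, if_neg hc]
      rw [ih (s+1) D'
        (by rw [hD'g]; omega)
        (by intro j hj; rw [hD'g]; exact hz j (by omega))]
      rw [hD'g, pv_take_succ_getD _ _ hslen, hz s le_rfl]
      simp [hval]

theorem Bstep_keys (d : List (String × Int)) (i : Nat)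
    (acc : PySem.Dict String (List Int))
    (hsub : ∀ k ∈ (PySem.Dict.ofList d).keys, k ∈ acc.keys) :
    ((PySem.Dict.ofList d).items.foldl
        (fun acc q => acc.modify q.1 [] (fun l => l.set i q.2)) acc).keys = acc.keys := by
  rw [PySem.Dict.keys_foldl_modify_key _ Prod.fst [] (fun acc q l => l.set i q.2) acc,
    PySem.Set.update_eq_append_filter]
  have : ∀ y ∈ PySem.Set.ofList ((PySem.Dict.ofList d).items.map Prod.fst),
      ¬ (!PySem.Set.contains acc.keys y) = true := by
    intro y hy
    have hyk : y ∈ (PySem.Dict.ofList d).keys := (PySem.Set.mem_ofList _ _).1 hy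
    simp
    exact hsub y hyk
  rw [List.filter_eq_nil_iff.2 this, List.append_nil]

theorem Bscatter_keys (ds : List (List (String × Int))) (s : Int)
    (D : PySem.Dict String (List Int))
    (hsub : ∀ d ∈ ds, ∀ k ∈ (PySem.Dict.ofList d).keys, k ∈ D.keys) :
    ((PySem.List.enumerate ds s).foldl (fun acc p =>
        (PySem.Dict.ofList p.2).items.foldl
          (fun acc q => acc.modify q.1 [] (fun l => l.set p.1.toNat q.2)) acc) D).keys
      = D.keys := by
  induction ds generalizing s D with
  | nil => rfl
  | cons d t ih =>
    rw [PySem.List.enumerate_cons, List.foldl_cons]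
    have hk := Bstep_keys d s.toNat D (hsub d (List.mem_cons_self ..))
    rw [ih (s+1) _ (by rw [hk]; exact fun d' hd' => hsub d' (List.mem_cons_of_mem _ hd')), hk]

theorem Binit_items (genesets : List (List (String × Int))) :
    ((pvAll genesets).foldl
        (fun acc gene => acc.insert gene (List.replicate genesets.length 0)) PySem.Dict.empty).items
      = (pvAll genesets).map (fun g => (g, List.replicate genesets.length (0 : Int))) := by
  rw [PySem.Dict.items_foldl_insert_fresh (pvAll genesets) (fun g => g)
    (fun _ => List.replicate genesets.length (0 : Int)) PySem.Dict.empty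
    (fun a _ => PySem.Dict.contains_empty a) (by simpa using pvAll_nodup genesets)]
  rfl

-- ===== VERDICT (by name: the statement is the Claim_ definition above) =====
theorem collapse_genes_spec : Claim_equal_collapse_genes := by
  intro genesets _
  unfold Spec_collapse_genes
  cases genesets with
  | nil => rfl
  | cons d0 ds =>
    have hGne : (d0 :: ds : List (List (String × Int))) ≠ [] := by simp
    set G : List (List (String × Int)) := d0 :: ds with hG
    -- name the two dictionaries the ports build
    set DA := (pvAll G).foldl (fun acc gene =>
        G.foldl (fun acc d =>
          acc.modify gene [] (fun l => l ++ [(PySem.Dict.ofList d).getD gene 0])) acc)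
        PySem.Dict.empty with hDA
    set DBinit := (pvAll G).foldl
        (fun acc gene => acc.insert gene (List.replicate G.length (0:Int))) PySem.Dict.empty with hDBinit
    set DB := (PySem.List.enumerate G).foldl (fun acc p =>
        (PySem.Dict.ofList p.2).items.foldl (fun acc q =>
          acc.modify q.1 [] (fun l => l.set p.1.toNat q.2)) acc) DBinit with hDB
    have hA : collapse_genes G = DA.items := rfl
    have hB : collapse_genes_alt G = DB.items := rfl
    rw [hA, hB]
    -- keys of both dictionaries are allgenes (Nodup)
    have hAkeys : DA.keys = pvAll G := by
      rw [hDA, Aouter_keys G hGne]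
      show PySem.Set.update ([] : PySem.Set String) (pvAll G) = pvAll G
      rw [PySem.Set.update_nil_left, PySem.Set.ofList_eq_self_of_nodup _ (pvAll_nodup G)]
    have hInitKeys : DBinit.keys = pvAll G := by
      show DBinit.items.map (·.1) = pvAll G
      rw [hDBinit, Binit_items]
      simp [Function.comp_def]
    have hBkeys : DB.keys = pvAll G := by
      rw [hDB, Bscatter_keys _ _ _ (by
        rw [hInitKeys]
        exact fun d hd k hk => mem_pvAll_of hd hk), hInitKeys]
    -- per-gene rows
    have hInitRow : ∀ g ∈ pvAll G, DBinit.getD g [] = List.replicate G.length 0 := by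
      intro g hg
      refine PySem.Dict.getD_of_mem_items _ ?_ (by rw [hInitKeys]; exact pvAll_nodup G) []
      rw [hDBinit, Binit_items]
      exact List.mem_map_of_mem hg
    have hArow : ∀ g ∈ pvAll G, DA.getD g [] = G.map (pvScore g) := by
      intro g hg
      rw [hDA]
      exact Aouter_getD G (pvAll G) _ (pvAll_nodup G) hg (PySem.Dict.contains_empty g)
    have hBrow : ∀ g ∈ pvAll G, DB.getD g [] = G.map (pvScore g) := by
      intro g hg
      have h0 : ((0 : Nat) : Int) = (0 : Int) := rfl
      rw [hDB, ← h0,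
        Bscatter_getD g G 0 DBinit
          (by rw [hInitRow g hg]; simp)
          (by intro j _; rw [hInitRow g hg]; simp [List.getD_eq_getElem?_getD]),
        hInitRow g hg]
      simp
    -- items follow from keys + rows
    rw [PySem.Dict.items_eq_map_keys DA (by rw [hAkeys]; exact pvAll_nodup G) [],
      PySem.Dict.items_eq_map_keys DB (by rw [hBkeys]; exact pvAll_nodup G) [],
      hAkeys, hBkeys]
    refine List.map_congr_left (fun g hg => ?_)
    rw [hArow g hg, hBrow g hg]
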